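-- pv_equiv track=rewrite | github.com/Ram-lankada/markbot | cron/mapper.py | build_reply_clusters_from_items
-- ===== SOURCE A (Python) =====
-- from collections import defaultdict
--
-- class DSU:
--     def __init__(self):
--         self.parent = {}
--
--     def find(self, x):
--         self.parent.setdefault(x, x)
--         if self.parent[x] != x:
--             self.parent[x] = self.find(self.parent[x])
--         return self.parent[x]
--
--     def union(self, a, b):
--         ra, rb = self.find(a), self.find(b)
--         if ra != rb:
--             self.parent[rb] = ra
--
-- def build_reply_clusters_from_items(items):
--     dsu = DSU()
--     by_id = {it["id"]: it for it in items if it.get("id")}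
--
--     for it in items:
--         mid = it.get("id")
--         if not mid:
--             continue
--         dsu.find(mid)
--         if it.get("reply_to"):
--             ref = it["reply_to"]
--             dsu.find(ref)
--             dsu.union(mid, ref)
--
--     clusters = defaultdict(list)
--     for it in items:
--         mid = it.get("id")
--         if not mid:
--             continue
--         clusters[dsu.find(mid)].append(it)
--
--     for k in list(clusters.keys()):
--         clusters[k].sort(key=lambda x: x.get("timestamp",""))
--
--     out = list(clusters.values())
--     out.sort(key=len, reverse=True)
--     return out
-- ===== SOURCE B (Python) =====
-- def build_reply_clusters_from_items(items):
--     # Label-table connected components: each seen id carries its class representative;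
--     # merging two classes rewrites one label to the other (full relabel): no parent pointers, no recursion.
--     label = {}
--     for it in items:
--         mid = it.get("id")
--         if not mid:
--             continue
--         label.setdefault(mid, mid)
--         ref = it.get("reply_to")
--         if ref:
--             label.setdefault(ref, ref)
--             ra, rb = label[mid], label[ref]
--             if ra != rb:
--                 label = {k: (ra if v == rb else v) for k, v in label.items()}
--     clusters = {}
--     for it in items:
--         mid = it.get("id")
--         if not mid:
--             continue
--         clusters.setdefault(label[mid], []).append(it)
--     out = [sorted(c, key=lambda x: x.get("timestamp", "")) for c in clusters.values()]
--     out.sort(key=len, reverse=True)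
--     return out
-- ===== Notes on version B (the rewrite author's own statement) =====
-- stated objective: alternative
-- what changed: A's recursive union-find (parent-pointer forest with path compression and root-merging) is replaced by a flat label table: every seen id maps directly to its class representative and a merge rewrites all labels of one class in a single relabelling pass, with no parent pointers, no recursion and no find; the grouping and the two stable sorts are kept identical.
import Mathlib
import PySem

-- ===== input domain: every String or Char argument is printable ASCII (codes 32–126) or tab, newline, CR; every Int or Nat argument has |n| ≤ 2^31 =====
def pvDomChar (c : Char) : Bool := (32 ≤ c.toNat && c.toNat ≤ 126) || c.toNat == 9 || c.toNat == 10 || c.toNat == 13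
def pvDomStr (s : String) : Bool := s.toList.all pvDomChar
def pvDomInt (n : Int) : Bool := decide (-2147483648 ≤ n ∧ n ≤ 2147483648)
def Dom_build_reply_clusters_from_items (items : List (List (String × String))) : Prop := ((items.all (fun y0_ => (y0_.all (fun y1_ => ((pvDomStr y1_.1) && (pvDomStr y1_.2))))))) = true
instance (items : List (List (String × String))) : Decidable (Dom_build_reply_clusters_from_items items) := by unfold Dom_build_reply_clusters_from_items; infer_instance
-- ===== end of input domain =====

-- B replaces A's recursive union-find (parent forest, path compression) by a flat
-- label table whose merges relabel one whole class in place — same results, no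
-- recursion and no parent pointers (objective: alternative algorithm, not speed).

-- ===== PORT A =====
-- dict.get(k) on an item, shared by both ports (Python dict ⇒ association list, first match)
def iget (it : List (String × String)) (k : String) : Option String :=
  List.lookup k it

-- DSU.find with path compression; the explicit fuel only bounds the recursion
-- depth (the Python recursion terminates because parent maps stay acyclic;
-- fuel = number of keys is always sufficient, see the proofs below).
def dsuFind (fuel : Nat) (p : PySem.Dict String String) (x : String) :
    PySem.Dict String String × String :=
  let p1 := p.setdefault x x                  -- self.parent.setdefault(x, x)
  let px := p1.getD x ""                      -- self.parent[x]
  if px = x then (p1, px)                     -- return self.parent[x]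
  else
    match fuel with
    | 0 => (p1, px)                           -- unreachable: parent maps are acyclic
    | fuel' + 1 =>
      let res := dsuFind fuel' p1 px          -- self.parent[x] = self.find(self.parent[x])
      (res.1.insert x res.2, res.2)           -- return self.parent[x] (just set to res.2)

-- DSU.find entry point: fuel = current number of keys (enough for any acyclic chain)
def dsuFindW (p : PySem.Dict String String) (x : String) :
    PySem.Dict String String × String :=
  dsuFind p.size p x

def dsuUnion (p : PySem.Dict String String) (a b : String) :
    PySem.Dict String String :=
  let fa := dsuFindW p a
  let fb := dsuFindW fa.1 b
  if fa.2 ≠ fb.2 then fb.1.insert fb.2 fa.2 else fb.1   -- self.parent[rb] = ra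

def aLoop1Step (p : PySem.Dict String String) (it : List (String × String)) :
    PySem.Dict String String :=
  match iget it "id" with
  | none => p
  | some mid =>
    if mid = "" then p
    else
      let p1 := (dsuFindW p mid).1
      match iget it "reply_to" with
      | none => p1
      | some ref =>
        if ref = "" then p1
        else
          let p2 := (dsuFindW p1 ref).1
          dsuUnion p2 mid ref

def aLoop2Step
    (st : PySem.Dict String String × PySem.Dict String (List (List (String × String))))
    (it : List (String × String)) :
    PySem.Dict String String × PySem.Dict String (List (List (String × String))) :=
  match iget it "id" with
  | none => st
  | some mid =>
    if mid = "" then st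
    else
      let f := dsuFindW st.1 mid
      (f.1, st.2.modify f.2 [] (· ++ [it]))   -- clusters[dsu.find(mid)].append(it)

def build_reply_clusters_from_items (items : List (List (String × String))) :
    List (List (List (String × String))) :=
  -- by_id = {it["id"]: it for it in items if it.get("id")}  (computed, never used)
  let _byId : PySem.Dict String (List (String × String)) :=
    items.foldl
      (fun d it =>
        match iget it "id" with
        | none => d
        | some mid => if mid = "" then d else d.insert mid it)
      PySem.Dict.empty
  let p := items.foldl aLoop1Step PySem.Dict.empty
  let st := items.foldl aLoop2Step (p, PySem.Dict.empty)
  let clusters := st.2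
  -- for k in list(clusters.keys()): clusters[k].sort(key=lambda x: x.get("timestamp",""))
  let clusters2 :=
    clusters.keys.foldl
      (fun cl k =>
        cl.insert k
          (PySem.List.sorted (cl.getD k []) (fun x => (iget x "timestamp").getD "")))
      clusters
  PySem.List.sorted clusters2.values (fun c => PySem.List.len c) true

-- ===== PORT B =====
-- one item of the label-table loop: ensure both endpoints are labelled, then
-- merge the two classes by rewriting every label rb to ra
def bLabelStep (l : PySem.Dict String String) (it : List (String × String)) :
    PySem.Dict String String :=
  match iget it "id" with
  | none => l
  | some mid =>
    if mid = "" then l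
    else
      let l1 := l.setdefault mid mid
      match iget it "reply_to" with
      | none => l1
      | some ref =>
        if ref = "" then l1
        else
          let l2 := l1.setdefault ref ref
          let ra := l2.getD mid ""
          let rb := l2.getD ref ""
          if ra ≠ rb then
            PySem.Dict.mk (l2.items.map (fun kv => (kv.1, if kv.2 = rb then ra else kv.2)))
          else l2

def bGroupStep (l : PySem.Dict String String)
    (cl : PySem.Dict String (List (List (String × String))))
    (it : List (String × String)) :
    PySem.Dict String (List (List (String × String))) :=
  match iget it "id" with
  | none => cl
  | some mid =>
    if mid = "" then cl
    else cl.modify (l.getD mid "") [] (· ++ [it])  -- clusters.setdefault(label[mid], []).append(it)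

def build_reply_clusters_from_items_alt (items : List (List (String × String))) :
    List (List (List (String × String))) :=
  let label := items.foldl bLabelStep PySem.Dict.empty
  let clusters := items.foldl (bGroupStep label) PySem.Dict.empty
  let out := clusters.values.map
    (fun c => PySem.List.sorted c (fun x => (iget x "timestamp").getD ""))
  PySem.List.sorted out (fun c => PySem.List.len c) true

-- ===== PRECONDITION & SPEC =====
def Spec_build_reply_clusters_from_items (items : List (List (String × String))) (out : List (List (List (String × String)))) : Prop := out = build_reply_clusters_from_items_alt items
instance (items : List (List (String × String))) (out : List (List (List (String × String)))) : Decidable (Spec_build_reply_clusters_from_items items out) := by unfold Spec_build_reply_clusters_from_items; infer_instance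

-- ===== CLAIM (what is proved, stated in full; the proofs are below) =====
def Claim_equal_build_reply_clusters_from_items : Prop := ∀ (items : List (List (String × String))), Dom_build_reply_clusters_from_items items → Spec_build_reply_clusters_from_items items (build_reply_clusters_from_items items)


-- ===== LEMMAS AND PROOFS =====

-- parent-map step (self.parent[x], total since every read is of a present key)
def pget (p : PySem.Dict String String) (z : String) : String := p.getD z ""

def lget (l : PySem.Dict String String) (z : String) : String := l.getD z ""

-- B's class-merge, as a named function (definitionally the Dict.mk ... in bLabelStep)
def relabel (l : PySem.Dict String String) (rb ra : String) : PySem.Dict String String :=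
  PySem.Dict.mk (l.items.map (fun kv => (kv.1, if kv.2 = rb then ra else kv.2)))

-- a parent chain from x to a root r, with all nodes distinct
inductive ReachP (p : PySem.Dict String String) : String → List String → String → Prop
  | root (x : String) (h : pget p x = x) : ReachP p x [x] x
  | step (x y : String) (c : List String) (r : String)
      (h : pget p x = y) (hne : x ≠ y) (hnc : x ∉ c) (hr : ReachP p y c r) :
      ReachP p x (x :: c) r

-- the coupling invariant between A's parent map and B's label map
structure InvPL (p l : PySem.Dict String String) : Prop where
  hk : p.keys = l.keys
  hnd : p.keys.Nodup
  e1 : ∀ x ∈ p.keys, pget p x ∈ p.keys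
  e2 : ∀ x ∈ p.keys, lget l (pget p x) = lget l x
  r1 : ∀ x ∈ p.keys, pget p x = x → lget l x = x
  r3 : ∀ x ∈ p.keys, lget l x ∈ p.keys
  r2 : ∀ x ∈ p.keys, lget l (lget l x) = lget l x
  wf : ∀ x ∈ p.keys, ∃ c r, ReachP p x c r ∧ c ⊆ p.keys

theorem reach_mem_self {p : PySem.Dict String String} {x : String} {c : List String} {r : String}
    (h : ReachP p x c r) : x ∈ c := by
  cases h <;> simp

theorem reach_root_mem {p : PySem.Dict String String} {x : String} {c : List String} {r : String}
    (h : ReachP p x c r) : r ∈ c := by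
  induction h with
  | root => simp
  | step x y c r h hne hnc hr ih => simp [ih]

theorem reach_nodup {p : PySem.Dict String String} {x : String} {c : List String} {r : String}
    (h : ReachP p x c r) : c.Nodup := by
  induction h with
  | root => simp
  | step x y c r h hne hnc hr ih => simp [hnc, ih]

theorem reach_congr {p p' : PySem.Dict String String} {x : String} {c : List String} {r : String}
    (h : ReachP p x c r) (hc : ∀ z ∈ c, pget p' z = pget p z) : ReachP p' x c r := by
  induction h with
  | root x h => exact ReachP.root x (by rw [hc x (by simp)]; exact h)
  | step x y c r h hne hnc hr ih =>
    exact ReachP.step x y c r (by rw [hc x (by simp)]; exact h) hne hnc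
      (ih (fun z hz => hc z (by simp [hz])))

theorem reach_root_of_self {p : PySem.Dict String String} {x : String} {c : List String} {r : String}
    (h : ReachP p x c r) (hrx : r = x) : pget p x = x := by
  cases h with
  | root _ h => exact h
  | step x y c r h hne hnc hr => exact absurd (hrx ▸ reach_root_mem hr) hnc

theorem reach_label {p l : PySem.Dict String String} (hI : InvPL p l)
    {x : String} {c : List String} {r : String}
    (h : ReachP p x c r) (hx : x ∈ p.keys) :
    lget l x = r ∧ r ∈ p.keys ∧ pget p r = r ∧ ∀ z ∈ c, lget l z = r := by
  induction h with
  | root x h =>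
    refine ⟨hI.r1 x hx h, hx, h, ?_⟩
    intro z hz; simp at hz; subst hz; exact hI.r1 z hx h
  | step x y c r h hne hnc hr ih =>
    have hy : y ∈ p.keys := h ▸ hI.e1 x hx
    obtain ⟨h1, h2, h3, h4⟩ := ih hy
    have hlx : lget l x = r := by
      have he := hI.e2 x hx; rw [h] at he; rw [← he, h1]
    refine ⟨hlx, h2, h3, ?_⟩
    intro z hz
    rcases List.mem_cons.mp hz with hz | hz
    · subst hz; exact hlx
    · exact h4 z hz

theorem reach_compress {p p' : PySem.Dict String String} {x : String} {c : List String} {r : String}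
    (h : ReachP p x c r)
    (hc : ∀ z ∈ c, pget p' z = pget p z ∨ pget p' z = r)
    (hroot : pget p' r = r) :
    ∃ c', c' ⊆ c ∧ ReachP p' x c' r := by
  induction h with
  | root x h =>
    rcases hc x (by simp) with h' | h'
    · exact ⟨[x], by simp, ReachP.root x (by rw [h', h])⟩
    · exact ⟨[x], by simp, ReachP.root x h'⟩
  | step x y c r h hne hnc hr ih =>
    rcases hc x (by simp) with h' | h'
    · obtain ⟨c', hsub, hR⟩ := ih (fun z hz => hc z (by simp [hz])) hroot
      refine ⟨x :: c', ?_, ReachP.step x y c' r (by rw [h']; exact h) hne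
        (fun hxm => hnc (hsub hxm)) hR⟩
      intro z hz
      rcases List.mem_cons.mp hz with hz | hz
      · simp [hz]
      · exact List.mem_cons_of_mem _ (hsub hz)
    · by_cases hxr : x = r
      · subst hxr; exact ⟨[x], by simp, ReachP.root x h'⟩
      · have hrc : r ∈ c := reach_root_mem hr
        refine ⟨[x, r], ?_, ReachP.step x r [r] r h' hxr (by simpa using hxr)
          (ReachP.root r hroot)⟩
        intro z hz
        simp at hz
        rcases hz with hz | hz
        · simp [hz]
        · subst hz; exact List.mem_cons_of_mem _ hrc

theorem reach_union {p p' : PySem.Dict String String} {y : String} {c : List String} {rb ra : String}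
    (h : ReachP p y c rb) (hra : ra ∉ c) (hne : rb ≠ ra)
    (hkeep : ∀ z ∈ c, z ≠ rb → pget p' z = pget p z)
    (hrb : pget p' rb = ra) (hroot : pget p' ra = ra) :
    ReachP p' y (c ++ [ra]) ra := by
  induction h with
  | root x h =>
    exact ReachP.step x ra [ra] ra hrb hne (by simpa using hne) (ReachP.root ra hroot)
  | step x y c r h hne2 hnc hr ih =>
    have hxr : x ≠ r := fun hxx => hnc (hxx ▸ reach_root_mem hr)
    refine ReachP.step x y (c ++ [ra]) ra (by rw [hkeep x (by simp) hxr]; exact h) hne2 ?_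
      (ih (fun hm => hra (List.mem_cons_of_mem _ hm)) hne
        (fun z hz hzr => hkeep z (List.mem_cons_of_mem _ hz) hzr) hrb)
    intro hm
    rcases List.mem_append.mp hm with hm | hm
    · exact hnc hm
    · simp at hm; subst hm; exact hra (by simp)

theorem contains_of_mem {ν : Type} (d : PySem.Dict String ν) {x : String} (h : x ∈ d.keys) :
    d.contains x = true := (PySem.Dict.contains_iff_mem_keys d x).mpr h

theorem contains_of_not_mem {ν : Type} (d : PySem.Dict String ν) {x : String} (h : x ∉ d.keys) :
    d.contains x = false := by
  rw [← Bool.not_eq_true, PySem.Dict.contains_iff_mem_keys]; exact h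

theorem pget_insert (p : PySem.Dict String String) (k v z : String) :
    pget (p.insert k v) z = if z = k then v else pget p z := by
  simp [pget, PySem.Dict.getD_insert]

theorem dsuFind_root (fuel : Nat) (p : PySem.Dict String String) (x : String)
    (hc : p.contains x = true) (h : pget p x = x) : dsuFind fuel p x = (p, x) := by
  rw [dsuFind.eq_def]
  simp only [PySem.Dict.setdefault_of_contains p x hc, pget] at *
  simp [h]

theorem dsuFind_step (fuel : Nat) (p : PySem.Dict String String) (x y : String)
    (hc : p.contains x = true) (h : pget p x = y) (hne : y ≠ x) :
    dsuFind (fuel + 1) p x =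
      ((dsuFind fuel p y).1.insert x (dsuFind fuel p y).2, (dsuFind fuel p y).2) := by
  rw [dsuFind.eq_def]
  simp only [PySem.Dict.setdefault_of_contains p x hc, pget] at *
  simp [h, hne]

theorem find_fresh' {p : PySem.Dict String String} {x : String} (hx : x ∉ p.keys)
    (fuel : Nat) : dsuFind fuel p x = (p.insert x x, x) := by
  rw [dsuFind.eq_def]
  simp only [PySem.Dict.setdefault_of_not_contains p x (contains_of_not_mem p hx)]
  simp

theorem inv_compress {p p' l : PySem.Dict String String} {r : String} (hI : InvPL p l)
    (hk : p'.keys = p.keys)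
    (hprop : ∀ z, pget p' z = pget p z ∨ (pget p' z = r ∧ lget l z = r))
    (hr : r ∈ p.keys) (hroot : pget p r = r) : InvPL p' l := by
  have hlr : lget l r = r := hI.r1 r hr hroot
  have hroot' : pget p' r = r := by
    rcases hprop r with h | h
    · rw [h, hroot]
    · exact h.1
  refine ⟨hk.trans hI.hk, hk ▸ hI.hnd, ?_, ?_, ?_, ?_, ?_, ?_⟩
  · intro z hz; rw [hk] at hz ⊢
    rcases hprop z with h | h
    · rw [h]; exact hI.e1 z hz
    · rw [h.1]; exact hr
  · intro z hz; rw [hk] at hz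
    rcases hprop z with h | h
    · rw [h]; exact hI.e2 z hz
    · rw [h.1, hlr, h.2]
  · intro z hz hzz; rw [hk] at hz
    rcases hprop z with h | h
    · exact hI.r1 z hz (h ▸ hzz)
    · have hzr : z = r := hzz.symm.trans h.1
      exact h.2.trans hzr.symm
  · intro z hz; rw [hk] at hz ⊢; exact hI.r3 z hz
  · intro z hz; rw [hk] at hz; exact hI.r2 z hz
  · intro z hz; rw [hk] at hz ⊢
    obtain ⟨c, rz, hR, hsub⟩ := hI.wf z hz
    obtain ⟨hlz, hrzk, hrzroot, hall⟩ := reach_label hI hR hz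
    by_cases hrz : rz = r
    · subst hrz
      obtain ⟨c', hsub', hR'⟩ := reach_compress hR
        (fun w _ => by rcases hprop w with h | h
                       · exact Or.inl h
                       · exact Or.inr h.1) hroot'
      exact ⟨c', rz, hR', fun w hw => hsub (hsub' hw)⟩
    · refine ⟨c, rz, reach_congr hR ?_, hsub⟩
      intro w hw
      rcases hprop w with h | h
      · exact h
      · exact absurd ((hall w hw).symm.trans h.2) hrz

theorem inv_fresh {p l : PySem.Dict String String} (hI : InvPL p l) {x : String}
    (hx : x ∉ p.keys) : InvPL (p.insert x x) (l.insert x x) := by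
  have hxl : x ∉ l.keys := hI.hk ▸ hx
  have hkp : (p.insert x x).keys = p.keys ++ [x] :=
    PySem.Dict.keys_insert_of_not_contains p x (contains_of_not_mem p hx)
  have hkl : (l.insert x x).keys = l.keys ++ [x] :=
    PySem.Dict.keys_insert_of_not_contains l x (contains_of_not_mem l hxl)
  have hmem : ∀ z, z ∈ (p.insert x x).keys ↔ z ∈ p.keys ∨ z = x := by
    intro z; rw [hkp]; simp
  have hgp : ∀ z, pget (p.insert x x) z = if z = x then x else pget p z := pget_insert p x x
  have hgl : ∀ z, lget (l.insert x x) z = if z = x then x else lget l z := by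
    intro z; simp [lget, PySem.Dict.getD_insert]
  have hne : ∀ z ∈ p.keys, z ≠ x := fun z hz hzx => hx (hzx ▸ hz)
  have hnel : ∀ z ∈ p.keys, lget l z ≠ x := fun z hz => hne _ (hI.r3 z hz)
  refine ⟨by rw [hkp, hkl, hI.hk], by
    rw [hkp, List.nodup_append]
    refine ⟨hI.hnd, by simp, ?_⟩
    intro a ha b hb
    rw [List.mem_singleton] at hb; subst hb; exact hne a ha, ?_, ?_, ?_, ?_, ?_, ?_⟩
  · intro z hz; rw [hmem] at hz ⊢
    rcases hz with hz | hz
    · rw [hgp, if_neg (hne z hz)]; exact Or.inl (hI.e1 z hz)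
    · subst hz; rw [hgp, if_pos rfl]; exact Or.inr rfl
  · intro z hz; rw [hmem] at hz
    rcases hz with hz | hz
    · rw [hgp, if_neg (hne z hz), hgl, hgl,
        if_neg (hne _ (hI.e1 z hz)), if_neg (hne z hz)]
      exact hI.e2 z hz
    · subst hz; rw [hgp, if_pos rfl]
  · intro z hz hzz; rw [hmem] at hz
    rcases hz with hz | hz
    · rw [hgp, if_neg (hne z hz)] at hzz
      rw [hgl, if_neg (hne z hz)]; exact hI.r1 z hz hzz
    · subst hz; rw [hgl, if_pos rfl]
  · intro z hz; rw [hmem] at hz ⊢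
    rcases hz with hz | hz
    · rw [hgl, if_neg (hne z hz)]; exact Or.inl (hI.r3 z hz)
    · subst hz; rw [hgl, if_pos rfl]; exact Or.inr rfl
  · intro z hz; rw [hmem] at hz
    rcases hz with hz | hz
    · rw [hgl z, if_neg (hne z hz), hgl (lget l z), if_neg (hnel z hz)]
      exact hI.r2 z hz
    · subst hz; simp [hgl]
  · intro z hz; rw [hmem] at hz
    rcases hz with hz | hz
    · obtain ⟨c, rz, hR, hsub⟩ := hI.wf z hz
      refine ⟨c, rz, reach_congr hR ?_, ?_⟩
      · intro w hw; rw [hgp, if_neg (hne w (hsub hw))]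
      · intro w hw; rw [hmem]; exact Or.inl (hsub hw)
    · subst hz
      refine ⟨[z], z, ReachP.root z (by rw [hgp, if_pos rfl]), ?_⟩
      intro w hw; simp at hw; subst hw; rw [hmem]; exact Or.inr rfl

theorem relabel_get?_aux (lst : List (String × String)) (rb ra z : String) :
    (PySem.Dict.mk (lst.map (fun kv => (kv.1, if kv.2 = rb then ra else kv.2)))).get? z =
      ((PySem.Dict.mk lst).get? z).map (fun v => if v = rb then ra else v) := by
  induction lst with
  | nil => rfl
  | cons kv lst ih =>
    obtain ⟨k, v⟩ := kv
    simp only [List.map_cons, PySem.Dict.get?_mk_cons]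
    by_cases h : (k == z) = true
    · simp [h]
    · simp [h, ih]

theorem relabel_get? (l : PySem.Dict String String) (rb ra z : String) :
    (relabel l rb ra).get? z = (l.get? z).map (fun v => if v = rb then ra else v) := by
  have := relabel_get?_aux l.items rb ra z
  exact this

theorem relabel_keys (l : PySem.Dict String String) (rb ra : String) :
    (relabel l rb ra).keys = l.keys := by
  show (l.items.map _).map Prod.fst = l.items.map Prod.fst
  rw [List.map_map]; rfl

theorem lget_relabel_mem {l : PySem.Dict String String} (_hnd : l.keys.Nodup) {z : String}
    (hz : z ∈ l.keys) (rb ra : String) :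
    lget (relabel l rb ra) z = if lget l z = rb then ra else lget l z := by
  have hc : (l.get? z).isSome := by
    rw [← PySem.Dict.contains_eq_isSome_get?]; exact contains_of_mem l hz
  obtain ⟨v, hv⟩ := Option.isSome_iff_exists.mp hc
  have h1 : lget l z = v := PySem.Dict.getD_of_get?_eq_some l "" hv
  have h2 : (relabel l rb ra).get? z = some (if v = rb then ra else v) := by
    rw [relabel_get?, hv]; rfl
  rw [lget, PySem.Dict.getD_of_get?_eq_some _ "" h2, h1]

theorem inv_union {p l : PySem.Dict String String} (hI : InvPL p l) {ra rb : String}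
    (hra : ra ∈ p.keys) (hrb : rb ∈ p.keys)
    (hpa : pget p ra = ra) (hpb : pget p rb = rb)
    (hla : lget l ra = ra) (hlb : lget l rb = rb)
    (hne : ra ≠ rb) : InvPL (p.insert rb ra) (relabel l rb ra) := by
  have hndl : l.keys.Nodup := hI.hk ▸ hI.hnd
  have hkp : (p.insert rb ra).keys = p.keys :=
    PySem.Dict.keys_insert_of_contains p ra (contains_of_mem p hrb)
  have hgl : ∀ z ∈ p.keys, lget (relabel l rb ra) z = if lget l z = rb then ra else lget l z :=
    fun z hz => lget_relabel_mem hndl (hI.hk ▸ hz) rb ra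
  have hgp : ∀ z, pget (p.insert rb ra) z = if z = rb then ra else pget p z := pget_insert p rb ra
  have hglra : lget (relabel l rb ra) ra = ra := by
    rw [hgl ra hra, hla, if_neg hne]
  refine ⟨by rw [hkp, hI.hk, relabel_keys], hkp ▸ hI.hnd, ?_, ?_, ?_, ?_, ?_, ?_⟩
  · intro z hz; rw [hkp] at hz ⊢; rw [hgp]
    by_cases h : z = rb
    · simp [h, hra]
    · simp only [if_neg h]; exact hI.e1 z hz
  · intro z hz; rw [hkp] at hz; rw [hgp]
    by_cases h : z = rb
    · subst h; rw [if_pos rfl, hglra, hgl z hz, hlb, if_pos rfl]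
    · rw [if_neg h, hgl _ (hI.e1 z hz), hgl z hz, hI.e2 z hz]
  · intro z hz hzz; rw [hkp] at hz; rw [hgp] at hzz
    by_cases h : z = rb
    · subst h; rw [if_pos rfl] at hzz; exact absurd hzz hne
    · rw [if_neg h] at hzz
      have := hI.r1 z hz hzz
      rw [hgl z hz, this, if_neg h]
  · intro z hz; rw [hkp] at hz ⊢; rw [hgl z hz]
    by_cases h : lget l z = rb
    · simp [h, hra]
    · simp only [if_neg h]; exact hI.r3 z hz
  · intro z hz; rw [hkp] at hz; rw [hgl z hz]
    by_cases h : lget l z = rb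
    · rw [if_pos h, hglra]
    · rw [if_neg h, hgl _ (hI.r3 z hz), hI.r2 z hz, if_neg h]
  · intro z hz; rw [hkp] at hz ⊢
    obtain ⟨c, rz, hR, hsub⟩ := hI.wf z hz
    obtain ⟨hlz, hrzk, hrzroot, hall⟩ := reach_label hI hR hz
    by_cases h : lget l z = rb
    · have hrzb : rz = rb := by rw [← hlz, h]
      subst hrzb
      have hnotra : ra ∉ c := by
        intro hm
        have := hall ra hm
        rw [hla] at this
        exact hne this
      refine ⟨c ++ [ra], ra, reach_union hR hnotra (fun he => hne he.symm)
        (fun w _ hw => by rw [hgp, if_neg hw]) (by rw [hgp, if_pos rfl])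
        (by rw [hgp, if_neg hne]; exact hpa), ?_⟩
      intro w hw
      rcases List.mem_append.mp hw with hw | hw
      · exact hsub hw
      · rw [List.mem_singleton] at hw; subst hw; exact hra
    · refine ⟨c, rz, reach_congr hR ?_, hsub⟩
      intro w hw
      have hwrb : w ≠ rb := by
        intro hwb
        have h1 : lget l w = rz := hall w hw
        rw [hwb, hlb] at h1
        exact h (hlz.trans h1.symm)
      rw [hgp, if_neg hwrb]

theorem find_go {p l : PySem.Dict String String} (hI : InvPL p l)
    {x : String} {c : List String} {r : String} (hR : ReachP p x c r) (hx : x ∈ p.keys) :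
    ∀ fuel, c.length ≤ fuel + 1 →
      (dsuFind fuel p x).2 = r ∧ (dsuFind fuel p x).1.keys = p.keys ∧
      (∀ z, pget (dsuFind fuel p x).1 z = pget p z ∨
            (pget (dsuFind fuel p x).1 z = r ∧ lget l z = r)) := by
  induction hR with
  | root x h =>
    intro fuel _
    rw [dsuFind_root fuel p x (contains_of_mem p hx) h]
    exact ⟨rfl, rfl, fun z => Or.inl rfl⟩
  | step x y c r h hne hnc hr ih =>
    intro fuel hfuel
    have hy : y ∈ p.keys := h ▸ hI.e1 x hx
    have hcpos : 0 < c.length := List.length_pos_of_mem (reach_mem_self hr)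
    match fuel with
    | 0 => simp only [List.length_cons] at hfuel; omega
    | fuel' + 1 =>
      obtain ⟨hv, hkeys, hprop⟩ := ih hy fuel' (by simp at hfuel ⊢; omega)
      rw [dsuFind_step fuel' p x y (contains_of_mem p hx) h (fun hyx => hne hyx.symm)]
      have hlx : lget l x = r :=
        (reach_label hI (ReachP.step x y c r h hne hnc hr) hx).1
      refine ⟨hv, ?_, ?_⟩
      · rw [PySem.Dict.keys_insert_of_contains _ _
          (contains_of_mem _ (hkeys ▸ hx))]
        exact hkeys
      · intro z
        rw [pget_insert]
        by_cases hzx : z = x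
        · subst hzx; rw [if_pos rfl]; exact Or.inr ⟨hv, hlx⟩
        · rw [if_neg hzx]; exact hprop z

theorem find_ok {p l : PySem.Dict String String} (hI : InvPL p l)
    {x : String} (hx : x ∈ p.keys) :
    (dsuFindW p x).2 = lget l x ∧ (dsuFindW p x).1.keys = p.keys ∧
    InvPL (dsuFindW p x).1 l := by
  obtain ⟨c, r, hR, hsub⟩ := hI.wf x hx
  obtain ⟨hlx, hrk, hrr, _⟩ := reach_label hI hR hx
  have hsz : p.size = p.keys.length := by simp [PySem.Dict.size, PySem.Dict.keys]
  have hlen : c.length ≤ p.size + 1 := by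
    have := (List.subperm_of_subset (reach_nodup hR) hsub).length_le
    omega
  obtain ⟨hv, hkeys, hprop⟩ := find_go hI hR hx p.size hlen
  exact ⟨by rw [show dsuFindW p x = dsuFind p.size p x from rfl, hv, hlx], hkeys,
    inv_compress hI hkeys hprop hrk hrr⟩

theorem find_fresh {p : PySem.Dict String String} {x : String} (hx : x ∉ p.keys) :
    dsuFindW p x = (p.insert x x, x) := find_fresh' hx p.size

theorem union_ok {p l : PySem.Dict String String} (hI : InvPL p l)
    {a b : String} (ha : a ∈ p.keys) (hb : b ∈ p.keys) :
    (dsuUnion p a b).keys = p.keys ∧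
    InvPL (dsuUnion p a b) (if lget l a = lget l b then l else relabel l (lget l b) (lget l a)) := by
  obtain ⟨hva, hka, hIa⟩ := find_ok hI ha
  obtain ⟨hvb, hkb, hIb⟩ := find_ok hIa (hka ▸ hb)
  have hkab : (dsuFindW (dsuFindW p a).1 b).1.keys = p.keys := hkb.trans hka
  have hra : lget l a ∈ p.keys := hI.r3 a ha
  have hrb : lget l b ∈ p.keys := hI.r3 b hb
  have hla : lget l (lget l a) = lget l a := hI.r2 a ha
  have hlb : lget l (lget l b) = lget l b := hI.r2 b hb
  have proot : ∀ {q : PySem.Dict String String}, InvPL q l → q.keys = p.keys →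
      ∀ {w}, w ∈ p.keys → lget l w = w → pget q w = w := by
    intro q hIq hkq w hw hlw
    obtain ⟨c, rw', hRw, _⟩ := hIq.wf w (hkq ▸ hw)
    have hh := (reach_label hIq hRw (hkq ▸ hw)).1
    exact reach_root_of_self hRw (by rw [← hh, hlw])
  rw [dsuUnion]
  simp only [hva, hvb, ne_eq]
  split_ifs with h
  · exact ⟨hkab, hIb⟩
  · refine ⟨?_, ?_⟩
    · rw [PySem.Dict.keys_insert_of_contains _ _ (contains_of_mem _ (by rw [hkab]; exact hrb))]
      exact hkab
    · exact inv_union hIb (by rw [hkab]; exact hra) (by rw [hkab]; exact hrb)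
        (proot hIb hkab hra hla) (proot hIb hkab hrb hlb) hla hlb h

theorem keys_setdefault_mono {ν : Type} (l : PySem.Dict String ν) {x : String}
    (hx : x ∈ l.keys) (k : String) (v : ν) : x ∈ (l.setdefault k v).keys := by
  by_cases hc : l.contains k = true
  · rw [PySem.Dict.setdefault_of_contains l v hc]; exact hx
  · rw [PySem.Dict.setdefault_of_not_contains l v (by simpa using hc),
      PySem.Dict.keys_insert_of_not_contains l v (by simpa using hc)]
    exact List.mem_append_left _ hx

theorem keys_setdefault_self {ν : Type} (l : PySem.Dict String ν) (k : String) (v : ν) :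
    k ∈ (l.setdefault k v).keys := by
  by_cases hc : l.contains k = true
  · rw [PySem.Dict.setdefault_of_contains l v hc]
    exact (PySem.Dict.contains_iff_mem_keys l k).mp hc
  · rw [PySem.Dict.setdefault_of_not_contains l v (by simpa using hc),
      PySem.Dict.keys_insert_of_not_contains l v (by simpa using hc)]
    exact List.mem_append_right _ (by simp)

-- registering one id on both sides: invariant kept, id now a key, keys only grow
theorem ensure_ok {p l : PySem.Dict String String} (hI : InvPL p l) (x : String) :
    InvPL (dsuFindW p x).1 (l.setdefault x x) ∧ x ∈ (dsuFindW p x).1.keys ∧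
      p.keys ⊆ (dsuFindW p x).1.keys := by
  by_cases hx : x ∈ p.keys
  · obtain ⟨_, hkeys, hI'⟩ := find_ok hI hx
    rw [PySem.Dict.setdefault_of_contains l x (contains_of_mem l (hI.hk ▸ hx))]
    exact ⟨hI', hkeys ▸ hx, fun z hz => hkeys ▸ hz⟩
  · rw [find_fresh hx,
      PySem.Dict.setdefault_of_not_contains l x (contains_of_not_mem l (hI.hk ▸ hx))]
    refine ⟨inv_fresh hI hx, ?_, ?_⟩
    · rw [PySem.Dict.keys_insert_of_not_contains p x (contains_of_not_mem p hx)]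
      exact List.mem_append_right _ (by simp)
    · rw [PySem.Dict.keys_insert_of_not_contains p x (contains_of_not_mem p hx)]
      exact fun z hz => List.mem_append_left _ hz

theorem step1_ok {p l : PySem.Dict String String} (hI : InvPL p l)
    (it : List (String × String)) : InvPL (aLoop1Step p it) (bLabelStep l it) := by
  rw [aLoop1Step, bLabelStep]
  cases hid : iget it "id" with
  | none => exact hI
  | some mid =>
    by_cases hmid : mid = ""
    · simp only [hmid]; exact hI
    · simp only [if_neg hmid]
      obtain ⟨hI1, hm1, hsub1⟩ := ensure_ok hI mid
      cases href : iget it "reply_to" with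
      | none => exact hI1
      | some ref =>
        by_cases href' : ref = ""
        · simp only [href']; exact hI1
        · simp only [if_neg href']
          obtain ⟨hI2, hr2, hsub2⟩ := ensure_ok hI1 ref
          have hm2 : mid ∈ (dsuFindW (dsuFindW p mid).1 ref).1.keys := hsub2 hm1
          obtain ⟨hk3, hI3⟩ := union_ok hI2 hm2 hr2
          simpa only [lget, relabel, ne_eq, ite_not] using hI3

theorem loop1_ok {p l : PySem.Dict String String} (hI : InvPL p l)
    (items : List (List (String × String))) :
    InvPL (items.foldl aLoop1Step p) (items.foldl bLabelStep l) := by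
  induction items generalizing p l with
  | nil => exact hI
  | cons it items ih => exact ih (step1_ok hI it)

theorem inv_empty : InvPL PySem.Dict.empty PySem.Dict.empty := by
  refine ⟨rfl, by rw [PySem.Dict.keys_empty]; exact List.nodup_nil, ?_, ?_, ?_, ?_, ?_, ?_⟩ <;>
    intro z hz <;> rw [PySem.Dict.keys_empty] at hz <;> cases hz

theorem bstep_keys_mono {l : PySem.Dict String String} {x : String} (hx : x ∈ l.keys)
    (it : List (String × String)) : x ∈ (bLabelStep l it).keys := by
  rw [bLabelStep]
  cases iget it "id" with
  | none => exact hx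
  | some mid =>
    by_cases hmid : mid = ""
    · simp only [hmid]; exact hx
    · simp only [if_neg hmid]
      have h1 := keys_setdefault_mono l hx mid mid
      cases iget it "reply_to" with
      | none => exact h1
      | some ref =>
        by_cases href : ref = ""
        · simp only [href]; exact h1
        · simp only [if_neg href]
          have h2 := keys_setdefault_mono _ h1 ref ref
          split_ifs with hc
          all_goals first
            | exact h2
            | (show x ∈ (relabel _ _ _).keys
               rw [relabel_keys]
               exact h2)

theorem bstep_keys_mem {l : PySem.Dict String String} {it : List (String × String)} {mid : String}
    (h : iget it "id" = some mid) (hne : mid ≠ "") : mid ∈ (bLabelStep l it).keys := by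
  rw [bLabelStep, h]
  simp only [if_neg hne]
  have h1 := keys_setdefault_self l mid mid
  cases iget it "reply_to" with
  | none => exact h1
  | some ref =>
    by_cases href : ref = ""
    · simp only [href]; exact h1
    · simp only [if_neg href]
      have h2 := keys_setdefault_mono _ h1 ref ref
      split_ifs with hc
      all_goals first
        | exact h2
        | (show mid ∈ (relabel _ _ _).keys
           rw [relabel_keys]
           exact h2)

theorem loop1_keys_mono {x : String} :
    ∀ (items : List (List (String × String))) (l : PySem.Dict String String),
      x ∈ l.keys → x ∈ (items.foldl bLabelStep l).keys := by
  intro items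
  induction items with
  | nil => exact fun l h => h
  | cons it items ih => exact fun l h => ih _ (bstep_keys_mono h it)

theorem loop1_mids {l : PySem.Dict String String} (items : List (List (String × String)))
    {it : List (String × String)} (hit : it ∈ items) {mid : String}
    (h : iget it "id" = some mid) (hne : mid ≠ "") :
    mid ∈ (items.foldl bLabelStep l).keys := by
  induction items generalizing l with
  | nil => cases hit
  | cons it' items ih =>
    rcases List.mem_cons.mp hit with hh | hh
    · subst hh
      exact loop1_keys_mono items _ (bstep_keys_mem h hne)
    · exact ih hh

theorem loop2_ok {p l : PySem.Dict String String} (hI : InvPL p l)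
    (items : List (List (String × String)))
    (cl : PySem.Dict String (List (List (String × String))))
    (hmids : ∀ it ∈ items, ∀ mid, iget it "id" = some mid → mid ≠ "" → mid ∈ p.keys) :
    (items.foldl aLoop2Step (p, cl)).2 = items.foldl (bGroupStep l) cl := by
  induction items generalizing p cl with
  | nil => rfl
  | cons it items ih =>
    simp only [List.foldl_cons]
    have hstep : aLoop2Step (p, cl) it =
        ((aLoop2Step (p, cl) it).1, bGroupStep l cl it) ∧
        InvPL (aLoop2Step (p, cl) it).1 l ∧ (aLoop2Step (p, cl) it).1.keys = p.keys := by
      rw [aLoop2Step, bGroupStep]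
      cases hid : iget it "id" with
      | none => exact ⟨rfl, hI, rfl⟩
      | some mid =>
        by_cases hmid : mid = ""
        · simp only [hmid]; exact ⟨rfl, hI, rfl⟩
        · simp only [if_neg hmid]
          have hm : mid ∈ p.keys := hmids it (by simp) mid hid hmid
          obtain ⟨hv, hk, hI'⟩ := find_ok hI hm
          exact ⟨by rw [hv]; rfl, hI', hk⟩
    rw [hstep.1]
    exact ih hstep.2.1 _ (fun it' hit' mid h hne => by
      rw [hstep.2.2]; exact hmids it' (List.mem_cons_of_mem _ hit') mid h hne)

theorem sort_stage_aux {ν : Type} (f : ν → ν) (dflt : ν) :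
    ∀ (ks : List String) (d : PySem.Dict String ν), ks.Nodup → d.keys.Nodup →
      (∀ k ∈ ks, k ∈ d.keys) →
      (ks.foldl (fun cl k => cl.insert k (f (cl.getD k dflt))) d).items =
        d.items.map (fun kv => if kv.1 ∈ ks then (kv.1, f kv.2) else kv) := by
  intro ks
  induction ks with
  | nil =>
    intro d _ _ _
    simp
  | cons k ks ih =>
    intro d hnd hdk hmem
    simp only [List.foldl_cons]
    have hc : d.contains k = true := contains_of_mem d (hmem k (by simp))
    have hitems : (d.insert k (f (d.getD k dflt))).items =
        d.items.map (fun kv => if kv.1 = k then (kv.1, f kv.2) else kv) := by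
      rw [PySem.Dict.items_insert_of_contains d _ hc]
      apply List.map_congr_left
      intro kv hkv
      by_cases h : kv.1 = k
      · have : d.getD k dflt = kv.2 := by
          obtain ⟨k', v'⟩ := kv
          simp only at h
          subst h
          exact PySem.Dict.getD_of_mem_items d hkv hdk dflt
        simp [h, this]
      · simp [h]
    have hk1 : (d.insert k (f (d.getD k dflt))).keys = d.keys :=
      PySem.Dict.keys_insert_of_contains d _ hc
    have hkn : k ∉ ks := (List.nodup_cons.mp hnd).1
    rw [ih (d.insert k (f (d.getD k dflt))) (List.nodup_cons.mp hnd).2 (hk1 ▸ hdk)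
      (fun k' hk' => hk1 ▸ hmem k' (by simp [hk'])), hitems, List.map_map]
    apply List.map_congr_left
    intro kv _
    by_cases h : kv.1 = k
    · simp [Function.comp, h, hkn]
    · by_cases h2 : kv.1 ∈ ks <;> simp [Function.comp, h, h2]

theorem sort_stage {ν : Type} (f : ν → ν) (d : PySem.Dict String ν) (dflt : ν)
    (hnd : d.keys.Nodup) :
    (d.keys.foldl (fun cl k => cl.insert k (f (cl.getD k dflt))) d).values =
      d.values.map f := by
  have h := sort_stage_aux f dflt d.keys d hnd hnd (fun k hk => hk)
  show (d.keys.foldl (fun cl k => cl.insert k (f (cl.getD k dflt))) d).items.map Prod.snd =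
    (d.items.map Prod.snd).map f
  rw [h, List.map_map, List.map_map]
  apply List.map_congr_left
  intro kv hkv
  simp [Function.comp, PySem.Dict.mem_keys_of_mem_items d hkv]

theorem nodup_keys_modify {ν : Type} (d : PySem.Dict String ν) (k : String) (d0 : ν)
    (f : ν → ν) (h : d.keys.Nodup) : (d.modify k d0 f).keys.Nodup := by
  rw [PySem.Dict.keys_modify]
  by_cases hc : d.contains k = true
  · rw [PySem.Dict.keys_insert_of_contains d _ hc]; exact h
  · rw [PySem.Dict.keys_insert_of_not_contains d _ (by simpa using hc),
      List.nodup_append]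
    refine ⟨h, by simp, ?_⟩
    intro a ha b hb
    rw [List.mem_singleton] at hb
    subst hb
    intro hab
    subst hab
    exact hc (contains_of_mem d ha)

theorem clusters_nodup (items : List (List (String × String)))
    (st : PySem.Dict String String × PySem.Dict String (List (List (String × String))))
    (h : st.2.keys.Nodup) : (items.foldl aLoop2Step st).2.keys.Nodup := by
  induction items generalizing st with
  | nil => exact h
  | cons it items ih =>
    refine ih _ ?_
    rw [aLoop2Step]
    cases iget it "id" with
    | none => exact h
    | some mid =>
      by_cases hmid : mid = ""
      · simp only [hmid]; exact h
      · simp only [if_neg hmid]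
        exact nodup_keys_modify _ _ _ _ h

theorem build_reply_clusters_from_items_spec : Claim_equal_build_reply_clusters_from_items := by
  intro items _
  show build_reply_clusters_from_items items = build_reply_clusters_from_items_alt items
  have hI : InvPL (items.foldl aLoop1Step PySem.Dict.empty)
      (items.foldl bLabelStep PySem.Dict.empty) := loop1_ok inv_empty items
  have hmids : ∀ it ∈ items, ∀ mid, iget it "id" = some mid → mid ≠ "" →
      mid ∈ (items.foldl aLoop1Step PySem.Dict.empty).keys := by
    intro it hit mid h hne
    rw [hI.hk]
    exact loop1_mids items hit h hne
  have hcl := loop2_ok hI items PySem.Dict.empty hmids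
  have hnd : ((items.foldl aLoop2Step
      (items.foldl aLoop1Step PySem.Dict.empty, PySem.Dict.empty)).2).keys.Nodup :=
    clusters_nodup items _ (by rw [PySem.Dict.keys_empty]; exact List.nodup_nil)
  have hsort := sort_stage
    (fun c => PySem.List.sorted c (fun x => (iget x "timestamp").getD ""))
    ((items.foldl aLoop2Step
      (items.foldl aLoop1Step PySem.Dict.empty, PySem.Dict.empty)).2) [] hnd
  simp only [build_reply_clusters_from_items, build_reply_clusters_from_items_alt]
  rw [hsort, hcl]
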